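-- pv_equiv track=rewrite | github.com/itsjustsandzz/dee_tee_train | MP-SPDZ/Compiler/dt_unit_tests_util.py | GroupPrefixSum_plain
-- ===== SOURCE A (Python) =====
-- def GroupPrefixSum_plain (g_plain, x_plain):
--     ans = []
--     sum_so_far = 0
--     for i in range(len(x_plain)):
--         if g_plain[i] == 1:
--             sum_so_far = x_plain[i]
--         else:
--             sum_so_far = sum_so_far + x_plain[i]
--         ans.append(sum_so_far)
--     return ans
-- ===== SOURCE B (Python) =====
-- def GroupPrefixSum_plain(g_plain, x_plain):
--     n = len(x_plain)
--     cuts = [i for i in range(n) if g_plain[i] == 1]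
--     ans = []
--     prev = 0
--     for c in cuts + [n]:
--         s = 0
--         for j in range(prev, c):
--             s = s + x_plain[j]
--             ans.append(s)
--         prev = c
--     return ans
-- ===== Notes on version B (the rewrite author's own statement) =====
-- stated objective: alternative
-- what changed: B first scans for the group-start boundaries (indices with g_plain[i]==1), then builds the answer segment by segment, running an independent prefix sum inside each segment, instead of A's single index loop with a conditionally reset accumulator.
import Mathlib
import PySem

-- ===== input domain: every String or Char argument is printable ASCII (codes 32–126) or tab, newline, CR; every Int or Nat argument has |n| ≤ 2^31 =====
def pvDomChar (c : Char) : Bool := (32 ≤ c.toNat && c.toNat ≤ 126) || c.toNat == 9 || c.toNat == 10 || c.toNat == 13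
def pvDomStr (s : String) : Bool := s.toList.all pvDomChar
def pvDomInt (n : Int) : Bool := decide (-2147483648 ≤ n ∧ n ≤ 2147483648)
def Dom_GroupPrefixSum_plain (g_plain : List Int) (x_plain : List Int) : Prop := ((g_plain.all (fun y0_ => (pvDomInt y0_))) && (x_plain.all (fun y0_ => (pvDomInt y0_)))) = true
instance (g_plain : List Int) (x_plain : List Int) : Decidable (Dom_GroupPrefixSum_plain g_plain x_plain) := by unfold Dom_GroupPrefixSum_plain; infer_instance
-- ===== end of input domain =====

-- B replaces A's single reset-accumulator loop by a boundary scan plus per-segment prefix sums (alternative decomposition, same cost; return-value equivalence).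


-- ===== PORT A =====
-- literal transliteration of A: for i in range(len(x_plain)) with a reset-or-add accumulator;
-- g_plain[i]/x_plain[i] are in range on Pre_ (pyGetD default never read there).
def GroupPrefixSum_plain (g_plain : List Int) (x_plain : List Int) : List Int :=
  ((PySem.List.pyRange 0 (x_plain.length : Int) 1).foldl
    (fun (st : List Int × Int) i =>
      let s := if PySem.List.pyGetD g_plain i 0 = 1
               then PySem.List.pyGetD x_plain i 0
               else st.2 + PySem.List.pyGetD x_plain i 0
      (st.1 ++ [s], s)) ([], 0)).1

-- ===== PORT B =====
-- cuts = [i for i in range(n) if g_plain[i] == 1]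
def pvCutsB (g_plain : List Int) (n : Int) : List Int :=
  (PySem.List.pyRange 0 n 1).filter (fun i => PySem.List.pyGetD g_plain i 0 = 1)

-- one segment: s = 0; for j in range(prev, c): s = s + x_plain[j]; ans.append(s)
def pvSegB (x_plain : List Int) (ans : List Int) (prev c : Int) : List Int :=
  ((PySem.List.pyRange prev c 1).foldl
    (fun (p : List Int × Int) j =>
      (p.1 ++ [p.2 + PySem.List.pyGetD x_plain j 0], p.2 + PySem.List.pyGetD x_plain j 0))
    (ans, 0)).1

def GroupPrefixSum_plain_alt (g_plain : List Int) (x_plain : List Int) : List Int :=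
  let n : Int := (x_plain.length : Int)
  ((pvCutsB g_plain n ++ [n]).foldl
    (fun (st : List Int × Int) c => (pvSegB x_plain st.1 st.2 c, c)) ([], 0)).1

-- ===== PRECONDITION & SPEC =====
-- A (and B) raise IndexError when g_plain is shorter than x_plain; exactly those inputs are excluded.
def Pre_GroupPrefixSum_plain (g_plain : List Int) (x_plain : List Int) : Prop :=
  x_plain.length ≤ g_plain.length
instance (g_plain : List Int) (x_plain : List Int) : Decidable (Pre_GroupPrefixSum_plain g_plain x_plain) := by
  unfold Pre_GroupPrefixSum_plain; infer_instance
def pvWitness_GroupPrefixSum_plain : List Int × List Int := ([1, 0, 1], [3, 4, 5])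

def Spec_GroupPrefixSum_plain (g_plain : List Int) (x_plain : List Int) (out : List Int) : Prop := out = GroupPrefixSum_plain_alt g_plain x_plain
instance (g_plain : List Int) (x_plain : List Int) (out : List Int) : Decidable (Spec_GroupPrefixSum_plain g_plain x_plain out) := by unfold Spec_GroupPrefixSum_plain; infer_instance

-- ===== CLAIM (what is proved, stated in full; the proofs are below) =====
def Claim_equal_GroupPrefixSum_plain : Prop := ∀ (g_plain : List Int) (x_plain : List Int), Dom_GroupPrefixSum_plain g_plain x_plain → Pre_GroupPrefixSum_plain g_plain x_plain → Spec_GroupPrefixSum_plain g_plain x_plain (GroupPrefixSum_plain g_plain x_plain)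

-- ===== LEMMAS AND PROOFS =====

-- reference recursion: state after processing indices 0..n-1 (ans, sum_so_far)
def pvRef (g_plain x_plain : List Int) : Nat → List Int × Int
  | 0 => ([], 0)
  | n + 1 =>
    let p := pvRef g_plain x_plain n
    let s := if PySem.List.pyGetD g_plain (n : Int) 0 = 1
             then PySem.List.pyGetD x_plain (n : Int) 0
             else p.2 + PySem.List.pyGetD x_plain (n : Int) 0
    (p.1 ++ [s], s)

-- A's fold equals the reference recursion
theorem pvA_eq_ref (g_plain x_plain : List Int) (n : Nat) :
    (PySem.List.pyRange 0 (n : Int) 1).foldl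
      (fun (st : List Int × Int) i =>
        let s := if PySem.List.pyGetD g_plain i 0 = 1
                 then PySem.List.pyGetD x_plain i 0
                 else st.2 + PySem.List.pyGetD x_plain i 0
        (st.1 ++ [s], s)) ([], 0) = pvRef g_plain x_plain n := by
  induction n with
  | zero => simp [PySem.List.pyRange_one_eq_nil, pvRef]
  | succ n ih =>
    rw [show ((n + 1 : Nat) : Int) = (n : Int) + 1 by push_cast; ring,
        PySem.List.pyRange_one_succ_right (Int.natCast_nonneg n),
        List.foldl_append, ih]
    simp [pvRef]

-- the outer-fold state after the cuts below n, together with the pending inner fold to n,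
-- reproduces the reference state
theorem pvB_inv (g_plain x_plain : List Int) (n : Nat) :
    0 ≤ ((pvCutsB g_plain (n : Int)).foldl
          (fun (st : List Int × Int) c => (pvSegB x_plain st.1 st.2 c, c)) ([], 0)).2 ∧
    ((pvCutsB g_plain (n : Int)).foldl
          (fun (st : List Int × Int) c => (pvSegB x_plain st.1 st.2 c, c)) ([], 0)).2 ≤ (n : Int) ∧
    (PySem.List.pyRange
        ((pvCutsB g_plain (n : Int)).foldl
          (fun (st : List Int × Int) c => (pvSegB x_plain st.1 st.2 c, c)) ([], 0)).2 (n : Int) 1).foldl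
      (fun (p : List Int × Int) j =>
        (p.1 ++ [p.2 + PySem.List.pyGetD x_plain j 0], p.2 + PySem.List.pyGetD x_plain j 0))
      (((pvCutsB g_plain (n : Int)).foldl
          (fun (st : List Int × Int) c => (pvSegB x_plain st.1 st.2 c, c)) ([], 0)).1, 0)
      = pvRef g_plain x_plain n := by
  induction n with
  | zero =>
    refine ⟨?_, ?_, ?_⟩ <;>
      simp [pvCutsB, PySem.List.pyRange_one_eq_nil, pvRef]
  | succ n ih =>
    obtain ⟨h0, hn, hfold⟩ := ih
    have hcast : ((n + 1 : Nat) : Int) = (n : Int) + 1 := by push_cast; ring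
    have hcuts : pvCutsB g_plain ((n + 1 : Nat) : Int)
        = pvCutsB g_plain (n : Int)
          ++ (if PySem.List.pyGetD g_plain (n : Int) 0 = 1 then [(n : Int)] else []) := by
      rw [pvCutsB, hcast, PySem.List.pyRange_one_succ_right (Int.natCast_nonneg n),
          List.filter_append]
      simp [pvCutsB]
      split_ifs <;> simp_all
    by_cases hg : PySem.List.pyGetD g_plain (n : Int) 0 = 1
    · -- a new cut at n: outer fold takes one more step, inner fold restarts at n
      rw [hcuts, if_pos hg, List.foldl_append]
      simp only [List.foldl_cons, List.foldl_nil]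
      refine ⟨Int.natCast_nonneg n, by rw [hcast]; omega, ?_⟩
      have hseg : pvSegB x_plain
          (((pvCutsB g_plain (n : Int)).foldl
            (fun (st : List Int × Int) c => (pvSegB x_plain st.1 st.2 c, c)) ([], 0)).1)
          (((pvCutsB g_plain (n : Int)).foldl
            (fun (st : List Int × Int) c => (pvSegB x_plain st.1 st.2 c, c)) ([], 0)).2)
          (n : Int) = (pvRef g_plain x_plain n).1 := by
        rw [pvSegB, hfold]
      rw [hcast, PySem.List.pyRange_one_singleton]
      simp only [List.foldl_cons, List.foldl_nil, hseg]
      have hg' : g_plain[n]?.getD 0 = 1 := by simpa using hg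
      simp [pvRef, hg']
    · -- no cut at n: same outer state, the inner fold extends by index n
      rw [hcuts, if_neg hg]
      simp only [List.append_nil]
      refine ⟨h0, by rw [hcast]; omega, ?_⟩
      rw [hcast, PySem.List.pyRange_one_succ_right hn, List.foldl_append, hfold]
      have hg' : g_plain[n]?.getD 0 ≠ 1 := by simpa using hg
      simp [pvRef, hg']

-- ===== VERDICT (by name: the statement is the Claim_ definition above) =====
theorem GroupPrefixSum_plain_spec : Claim_equal_GroupPrefixSum_plain := by
  intro g x _ _
  unfold Spec_GroupPrefixSum_plain GroupPrefixSum_plain GroupPrefixSum_plain_alt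
  dsimp only
  rw [pvA_eq_ref, List.foldl_append]
  obtain ⟨_, _, hfold⟩ := pvB_inv g x x.length
  simp only [List.foldl_cons, List.foldl_nil]
  rw [pvSegB, hfold]
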